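-- pv_equiv track=rewrite | github.com/Sriya-Krishna/dl-project | gen_data.py | _trim_arith_to_chars
-- ===== SOURCE A (Python) =====
-- from bisect import bisect_right
--
-- def _trim_arith_to_chars(parts, target_chars):
--     """Find largest prefix of arithmetic parts fitting within target_chars."""
--     cum = []
--     total = 0
--     for p in parts:
--         total += len(p)
--         cum.append(total)
--     n = bisect_right(cum, target_chars)
--     return "".join(parts[:max(n, 1)])
-- ===== SOURCE B (Python) =====
-- def _trim_arith_to_chars(parts, target_chars):
--     """Find largest prefix of arithmetic parts fitting within target_chars."""
--     total = 0
--     n = 0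
--     for p in parts:
--         total += len(p)
--         if total > target_chars:
--             break
--         n += 1
--     return "".join(parts[:max(n, 1)])
-- ===== Notes on version B (the rewrite author's own statement) =====
-- stated objective: simpler
-- what changed: Replaces building a cumulative-lengths table and binary-searching it with bisect_right by a single greedy scan that keeps a running total and breaks at the first part that overflows the budget.
import Mathlib
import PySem

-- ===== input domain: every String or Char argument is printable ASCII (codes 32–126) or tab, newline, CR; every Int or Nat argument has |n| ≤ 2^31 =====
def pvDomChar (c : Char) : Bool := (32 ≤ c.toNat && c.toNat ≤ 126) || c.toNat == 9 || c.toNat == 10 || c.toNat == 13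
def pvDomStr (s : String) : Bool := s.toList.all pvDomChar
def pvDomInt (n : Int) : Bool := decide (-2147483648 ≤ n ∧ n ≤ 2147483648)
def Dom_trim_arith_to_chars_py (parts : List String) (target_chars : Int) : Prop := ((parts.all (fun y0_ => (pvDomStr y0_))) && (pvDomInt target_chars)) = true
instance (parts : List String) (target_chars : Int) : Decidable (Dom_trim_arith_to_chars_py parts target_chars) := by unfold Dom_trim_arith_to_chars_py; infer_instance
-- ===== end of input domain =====

-- B replaces A's cumulative-lengths table + bisect_right binary search by one greedy
-- scan with a running total that breaks at the first overflow (simpler, same O(n) cost).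

-- ===== PORT A =====
-- the 'for p in parts: total += len(p); cum.append(total)' loop (accumulator = total)
def pvBuildCum : List String → Int → List Int
  | [], _ => []
  | p :: rest, total =>
    let total' := total + PySem.Str.len p
    total' :: pvBuildCum rest total'

-- CPython's bisect_right: lo=0, hi=len(a); while lo<hi: mid=(lo+hi)//2;
-- if x < a[mid]: hi=mid else lo=mid+1; return lo   (a[mid] is always in range here;
-- fuel only bounds the loop: hi-lo shrinks every iteration, so len(a)+1 steps always suffice)
def pvBisectGo (fuel : Nat) (a : List Int) (x : Int) (lo hi : Nat) : Nat :=
  match fuel with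
  | 0 => lo
  | fuel + 1 =>
    if lo < hi then
      if x < a.getD ((lo + hi) / 2) 0 then pvBisectGo fuel a x lo ((lo + hi) / 2)
      else pvBisectGo fuel a x ((lo + hi) / 2 + 1) hi
    else lo

def trim_arith_to_chars_py (parts : List String) (target_chars : Int) : String :=
  let cum := pvBuildCum parts 0
  let n := pvBisectGo (cum.length + 1) cum target_chars 0 cum.length
  PySem.Str.join "" (PySem.List.slice parts none (some (max (n : Int) 1)))

-- ===== PORT B =====
-- the greedy loop of Source B: n counts parts while the running total stays ≤ target_chars
def pvCountFit : List String → Int → Int → Nat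
  | [], _, _ => 0
  | p :: rest, tc, total =>
    let total' := total + PySem.Str.len p
    if total' > tc then 0 else pvCountFit rest tc total' + 1

def trim_arith_to_chars_py_alt (parts : List String) (target_chars : Int) : String :=
  let n := pvCountFit parts target_chars 0
  PySem.Str.join "" (PySem.List.slice parts none (some (max (n : Int) 1)))

-- ===== PRECONDITION & SPEC =====
def Spec_trim_arith_to_chars_py (parts : List String) (target_chars : Int) (out : String) : Prop := out = trim_arith_to_chars_py_alt parts target_chars
instance (parts : List String) (target_chars : Int) (out : String) : Decidable (Spec_trim_arith_to_chars_py parts target_chars out) := by unfold Spec_trim_arith_to_chars_py; infer_instance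

-- ===== CLAIM (what is proved, stated in full; the proofs are below) =====
def Claim_equal_trim_arith_to_chars_py : Prop := ∀ (parts : List String) (target_chars : Int), Dom_trim_arith_to_chars_py parts target_chars → Spec_trim_arith_to_chars_py parts target_chars (trim_arith_to_chars_py parts target_chars)

-- ===== LEMMAS AND PROOFS =====

-- index of the first element > x (= length of the ≤-x prefix of a nondecreasing list)
def pvFirstGt : List Int → Int → Nat
  | [], _ => 0
  | a :: r, x => if x < a then 0 else pvFirstGt r x + 1

theorem pvFirstGt_le_length (l : List Int) (x : Int) : pvFirstGt l x ≤ l.length := by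
  induction l with
  | nil => simp [pvFirstGt]
  | cons a r ih => simp only [pvFirstGt, List.length_cons]; split <;> omega

theorem pvFirstGt_getD_le (l : List Int) (x : Int) :
    ∀ i, i < pvFirstGt l x → l.getD i 0 ≤ x := by
  induction l with
  | nil => intro i h; simp [pvFirstGt] at h
  | cons a r ih =>
    intro i h
    simp only [pvFirstGt] at h
    split at h
    · omega
    · cases i with
      | zero => simpa using le_of_not_gt ‹¬ x < a›
      | succ j => simpa using ih j (by omega)

theorem pvGetD_pvFirstGt_gt (l : List Int) (x : Int) :
    pvFirstGt l x < l.length → x < l.getD (pvFirstGt l x) 0 := by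
  induction l with
  | nil => intro h; simp [pvFirstGt] at h
  | cons a r ih =>
    intro h
    by_cases hx : x < a
    · simp [pvFirstGt, hx]
    · simp only [pvFirstGt, if_neg hx, List.length_cons] at h
      simp only [pvFirstGt, if_neg hx, List.getD_cons_succ]
      exact ih (by omega)

theorem pvCountFit_eq (parts : List String) (tc : Int) :
    ∀ total, pvCountFit parts tc total = pvFirstGt (pvBuildCum parts total) tc := by
  induction parts with
  | nil => intro t; simp [pvCountFit, pvBuildCum, pvFirstGt]
  | cons p rest ih =>
    intro t
    simp only [pvCountFit, pvBuildCum, pvFirstGt, gt_iff_lt]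
    split
    · rfl
    · rw [ih]

theorem pvBuildCum_lb (parts : List String) :
    ∀ t y, y ∈ pvBuildCum parts t → t ≤ y := by
  induction parts with
  | nil => intro t y h; simp [pvBuildCum] at h
  | cons p rest ih =>
    intro t y h
    have hlen : (0 : Int) ≤ PySem.Str.len p := by
      simp [PySem.Str.len_eq]
    simp only [pvBuildCum, List.mem_cons] at h
    rcases h with h | h
    · omega
    · have := ih (t + PySem.Str.len p) y h
      omega

theorem pvGetD_mem (l : List Int) : ∀ k, k < l.length → l.getD k 0 ∈ l := by
  induction l with
  | nil => intro k h; simp at h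
  | cons a r ih =>
    intro k h
    cases k with
    | zero => simp
    | succ j => simpa using Or.inr (ih j (by simpa using h))

theorem pvBuildCum_mono (parts : List String) :
    ∀ t i j, i ≤ j → j < (pvBuildCum parts t).length →
      (pvBuildCum parts t).getD i 0 ≤ (pvBuildCum parts t).getD j 0 := by
  induction parts with
  | nil => intro t i j _ h; simp [pvBuildCum] at h
  | cons p rest ih =>
    intro t i j hij hj
    simp only [pvBuildCum, List.length_cons] at *
    cases i with
    | zero =>
      cases j with
      | zero => simp
      | succ j' =>
        simp only [List.getD_cons_zero, List.getD_cons_succ]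
        exact pvBuildCum_lb rest _ _ (pvGetD_mem _ j' (by omega))
    | succ i' =>
      cases j with
      | zero => omega
      | succ j' =>
        simp only [List.getD_cons_succ]
        exact ih _ i' j' (by omega) (by omega)

theorem pvBisectGo_eq (a : List Int) (x : Int)
    (hs : ∀ i j, i ≤ j → j < a.length → a.getD i 0 ≤ a.getD j 0) :
    ∀ fuel lo hi, hi - lo < fuel → lo ≤ pvFirstGt a x → pvFirstGt a x ≤ hi → hi ≤ a.length →
      pvBisectGo fuel a x lo hi = pvFirstGt a x := by
  intro fuel
  induction fuel with
  | zero => intro lo hi hd; omega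
  | succ f ih =>
    intro lo hi hd h1 h2 h3
    unfold pvBisectGo
    split
    · rename_i hlt
      set k := pvFirstGt a x with hk
      set mid := (lo + hi) / 2 with hmid
      have hm1 : lo ≤ mid := by omega
      have hm2 : mid < hi := by omega
      split
      · rename_i hx
        -- x < a[mid] ⇒ k ≤ mid
        have hkm : k ≤ mid := by
          by_contra hc
          have := pvFirstGt_getD_le a x mid (by omega)
          omega
        exact ih lo mid (by omega) h1 hkm (by omega)
      · rename_i hx
        -- a[mid] ≤ x ⇒ mid < k
        have hkm : mid + 1 ≤ k := by
          by_contra hc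
          have hklen : k < a.length := by omega
          have hgt := pvGetD_pvFirstGt_gt a x hklen
          rw [← hk] at hgt
          have hle := hs k mid (by omega) (by omega)
          omega
        exact ih (mid + 1) hi (by omega) hkm h2 h3
    · omega

theorem pvCounts_agree (parts : List String) (tc : Int) :
    pvBisectGo ((pvBuildCum parts 0).length + 1) (pvBuildCum parts 0) tc 0 (pvBuildCum parts 0).length
      = pvCountFit parts tc 0 := by
  rw [pvCountFit_eq]
  exact pvBisectGo_eq (pvBuildCum parts 0) tc (pvBuildCum_mono parts 0) _ 0 _ (by omega)
    (Nat.zero_le _) (pvFirstGt_le_length _ _) le_rfl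

-- ===== VERDICT (by name: the statement is the Claim_ definition above) =====
theorem trim_arith_to_chars_py_spec : Claim_equal_trim_arith_to_chars_py := by
  intro parts tc _
  unfold Spec_trim_arith_to_chars_py trim_arith_to_chars_py trim_arith_to_chars_py_alt
  simp only [pvCounts_agree]
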